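-- pv_equiv track=rewrite | github.com/albertonii/titotuteAPP | scripts/convert_trainings.py | parse_warmups
-- ===== SOURCE A (Python) =====
-- from typing import Any, Dict, List, Optional
--
-- def normalize(value: Optional[Any]) -> Optional[str]:
--     if value is None:
--         return None
--     if isinstance(value, float) and value.is_integer():
--         return str(int(value))
--     return str(value).strip()
--
-- def parse_warmups(rows: List[List[Optional[str]]]) -> List[Dict[str, Optional[str]]]:
--     warmups: List[Dict[str, Optional[str]]] = []
--     inside = False
--     for row in rows:
--         text = normalize(row[1]) if len(row) > 1 else None
--         if text == "EN EL CALENTAMIENTO:":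
--             inside = True
--             continue
--         if inside:
--             if not text:
--                 break
--             if text and text.startswith("SERIES &"):
--                 break
--             link = None
--             if len(row) > 4:
--                 link = normalize(row[4])
--             warmups.append({"description": text, "resource": link})
--     return warmups
-- ===== SOURCE B (Python) =====
-- from typing import Any, Dict, List, Optional
--
-- MARKER = "EN EL CALENTAMIENTO:"
--
-- def normalize(value: Optional[Any]) -> Optional[str]:
--     if value is None:
--         return None
--     if isinstance(value, float) and value.is_integer():
--         return str(int(value))
--     return str(value).strip()
--
-- def parse_warmups(rows: List[List[Optional[str]]]) -> List[Dict[str, Optional[str]]]: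
--     # Declarative pipeline: precompute all texts, locate the marker with list.index,
--     # filter away repeated marker rows, cut at the first stop row, build the dicts.
--     texts = [normalize(r[1]) if len(r) > 1 else None for r in rows]
--     try:
--         start = texts.index(MARKER) + 1
--     except ValueError:
--         return []
--     tail = [(t, r) for t, r in zip(texts[start:], rows[start:]) if t != MARKER]
--     stops = [i for i, (t, _) in enumerate(tail)
--              if not t or t.startswith("SERIES &")]
--     end = stops[0] if stops else len(tail)
--     return [{"description": t,
--              "resource": normalize(r[4]) if len(r) > 4 else None}
--             for t, r in tail[:end]]
-- ===== Notes on version B (the rewrite author's own statement) =====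
-- stated objective: alternative
-- what changed: Replaced A's single stateful loop with an 'inside' flag, break and continue by a loop-free staged pipeline of list comprehensions: precompute every row's normalized text, locate the marker with list.index, filter out repeated marker rows, compute the first stop index and slice, then build the dicts by comprehension.
import Mathlib
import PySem

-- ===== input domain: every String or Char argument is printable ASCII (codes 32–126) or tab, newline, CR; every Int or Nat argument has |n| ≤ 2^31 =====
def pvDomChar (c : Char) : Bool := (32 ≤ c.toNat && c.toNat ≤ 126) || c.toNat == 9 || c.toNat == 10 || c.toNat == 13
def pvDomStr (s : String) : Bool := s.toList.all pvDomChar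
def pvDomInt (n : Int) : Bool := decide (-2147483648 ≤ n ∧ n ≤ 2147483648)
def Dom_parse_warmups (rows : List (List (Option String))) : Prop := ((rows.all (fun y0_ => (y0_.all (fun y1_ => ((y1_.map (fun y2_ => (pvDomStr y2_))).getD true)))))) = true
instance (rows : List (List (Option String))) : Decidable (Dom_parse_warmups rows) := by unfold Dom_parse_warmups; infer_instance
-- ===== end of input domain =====

-- B replaces A's single stateful loop (inside flag, break/continue) by a loop-free staged
-- pipeline: precompute texts, list.index the marker, filter repeated markers, cut at the
-- first stop index, build entries by comprehension; same O(n) cost (objective: alternative).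


-- ===== PORT A =====
-- normalize: arguments here are Option String, so the float branch never fires; str(s).strip() = strip
def pwNormA (v : Option String) : Option String := v.map PySem.Str.strip

-- text = normalize(row[1]) if len(row) > 1 else None
def pwTextA (row : List (Option String)) : Option String :=
  if 1 < row.length then pwNormA (row.getD 1 none) else none

-- the for-loop of A: structural recursion over rows carrying the `inside` flag;
-- `break` returns the entries collected so far (ends the recursion)
def pwLoopA (inside : Bool) : List (List (Option String)) → List (List (String × Option String))
  | [] => []
  | row :: rest =>
    let text := pwTextA row
    if text = some "EN EL CALENTAMIENTO:" then pwLoopA true rest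
    else if inside then
      match text with
      | none => []
      | some t =>
        if t = "" then []
        else if PySem.Str.startswith t "SERIES &" then []
        else
          let link := if 4 < row.length then pwNormA (row.getD 4 none) else none
          [("description", some t), ("resource", link)] :: pwLoopA inside rest
    else pwLoopA inside rest

def parse_warmups (rows : List (List (Option String))) : List (List (String × Option String)) :=
  pwLoopA false rows

-- ===== PORT B =====
def pwNormB (v : Option String) : Option String := v.map PySem.Str.strip

-- one element of texts = [normalize(r[1]) if len(r) > 1 else None for r in rows]
def pwTextB (row : List (Option String)) : Option String :=
  if 1 < row.length then pwNormB (row.getD 1 none) else none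

-- not t or t.startswith("SERIES &")  (the stop condition of the stops comprehension)
def pwStop (t : Option String) : Bool :=
  match t with
  | none => true
  | some s => s == "" || PySem.Str.startswith s "SERIES &"

-- stops = [i for i, (t, _) in enumerate(tail) if not t or t.startswith("SERIES &")]
def pwStops (i : Nat) : List (Option String × List (Option String)) → List Nat
  | [] => []
  | p :: rest => if pwStop p.1 then i :: pwStops (i + 1) rest else pwStops (i + 1) rest

-- {"description": t, "resource": normalize(r[4]) if len(r) > 4 else None}
def pwEntry (p : Option String × List (Option String)) : List (String × Option String) :=
  [("description", p.1),
   ("resource", if 4 < p.2.length then pwNormB (p.2.getD 4 none) else none)]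

def parse_warmups_alt (rows : List (List (Option String))) : List (List (String × Option String)) :=
  let texts := rows.map pwTextB
  match PySem.List.index? texts (some "EN EL CALENTAMIENTO:") with
  | none => []
  | some i =>
    let start := i + 1
    let tail := ((texts.drop start).zip (rows.drop start)).filter
      (fun p => p.1 != some "EN EL CALENTAMIENTO:")
    let stops := pwStops 0 tail
    let stop := stops.head?.getD tail.length
    (tail.take stop).map pwEntry

-- ===== PRECONDITION & SPEC =====
def Spec_parse_warmups (rows : List (List (Option String))) (out : List (List (String × Option String))) : Prop := out = parse_warmups_alt rows
instance (rows : List (List (Option String))) (out : List (List (String × Option String))) : Decidable (Spec_parse_warmups rows out) := by unfold Spec_parse_warmups; infer_instance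

-- ===== CLAIM =====
def Claim_equal_parse_warmups : Prop := ∀ (rows : List (List (Option String))), Dom_parse_warmups rows → Spec_parse_warmups rows (parse_warmups rows)

-- ===== LEMMAS AND PROOFS =====

lemma pwText_eq (row : List (Option String)) : pwTextA row = pwTextB row := rfl

-- every index produced by pwStops k is ≥ k
lemma pwStops_ge (k : Nat) (l : List (Option String × List (Option String))) :
    ∀ m ∈ pwStops k l, k ≤ m := by
  induction l generalizing k with
  | nil => simp [pwStops]
  | cons p rest ih =>
    intro m hm
    simp only [pwStops] at hm
    split_ifs at hm with h
    · rcases List.mem_cons.1 hm with rfl | hm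
      · exact le_refl m
      · exact Nat.le_of_succ_le (ih (k + 1) m hm)
    · exact Nat.le_of_succ_le (ih (k + 1) m hm)

-- taking up to the first stop index equals takeWhile (no stop)
lemma take_stop_eq_takeWhile (k : Nat) (l : List (Option String × List (Option String))) :
    l.take (((pwStops k l).head?.getD (k + l.length)) - k) =
      l.takeWhile (fun p => !pwStop p.1) := by
  induction l generalizing k with
  | nil => simp
  | cons p rest ih =>
    cases hb : pwStop p.1 with
    | true => simp [pwStops, hb]
    | false =>
      simp only [pwStops, hb, Bool.false_eq_true, if_false, List.takeWhile_cons,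
        Bool.not_false, List.length_cons]
      rw [if_pos trivial]
      have harith : k + (rest.length + 1) = (k + 1) + rest.length := by omega
      rw [harith]
      have hge : k + 1 ≤ (pwStops (k + 1) rest).head?.getD ((k + 1) + rest.length) := by
        cases hs : (pwStops (k + 1) rest).head? with
        | none => simp
        | some m =>
          have := pwStops_ge (k + 1) rest m (List.mem_of_mem_head? (by simp [hs]))
          simpa using this
      have hx : (pwStops (k + 1) rest).head?.getD ((k + 1) + rest.length) - k =
          ((pwStops (k + 1) rest).head?.getD ((k + 1) + rest.length) - (k + 1)) + 1 := by
        omega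
      rw [hx, List.take_succ_cons, ih (k + 1)]

-- zip of mapped texts with the rows themselves is a single map
lemma zip_texts (l : List (List (Option String))) :
    (l.map pwTextB).zip l = l.map (fun r => (pwTextB r, r)) := by
  induction l with
  | nil => rfl
  | cons r rest ih => simp [ih]

-- A's loop with inside = true is B's filter-then-takeWhile pipeline
lemma loopA_true_eq_pipeline (l : List (List (Option String))) :
    pwLoopA true l =
      (((l.map fun r => (pwTextB r, r)).filter
          (fun p => p.1 != some "EN EL CALENTAMIENTO:")).takeWhile
        (fun p => !pwStop p.1)).map pwEntry := by
  induction l with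
  | nil => rfl
  | cons row rest ih =>
    simp only [pwLoopA, List.map_cons, List.filter_cons, pwText_eq]
    by_cases hm : pwTextB row = some "EN EL CALENTAMIENTO:"
    · simp [hm, ih]
    · have hne : (pwTextB row != some "EN EL CALENTAMIENTO:") = true := by simpa using hm
      simp only [hm, if_false, if_true, hne, List.takeWhile_cons]
      cases ht : pwTextB row with
      | none => simp [pwStop]
      | some t =>
        by_cases h1 : t = ""
        · have hstop : pwStop (some t) = true := by
            show (t == "" || PySem.Str.startswith t "SERIES &") = true
            simp [h1]
          simp only [if_pos h1, hstop]
          simp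
        · cases h2 : PySem.Str.startswith t "SERIES &" with
          | true =>
            have hstop : pwStop (some t) = true := by
              show (t == "" || PySem.Str.startswith t "SERIES &") = true
              rw [h2]; simp
            simp only [if_neg h1, h2, hstop]
            simp
          | false =>
            have hstop : pwStop (some t) = false := by
              show (t == "" || PySem.Str.startswith t "SERIES &") = false
              rw [h2]; simpa using h1
            simp only [if_neg h1, h2, hstop, Bool.not_false, Bool.false_eq_true, if_false]
            rw [if_pos trivial, List.map_cons, ih]
            simp [pwEntry, pwNormA, pwNormB]

-- the k = 0 instance of take_stop_eq_takeWhile, in B's exact shape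
lemma take_stop_zero (l : List (Option String × List (Option String))) :
    l.take ((pwStops 0 l).head?.getD l.length) =
      l.takeWhile (fun p => !pwStop p.1) := by
  have h := take_stop_eq_takeWhile 0 l
  simpa using h

-- B's phase-2 value on a suffix, written with pwStops, equals A's inside-loop
lemma loopA_true_eq_alt_tail (l : List (List (Option String))) :
    pwLoopA true l =
      (let tail := ((l.map pwTextB).zip l).filter
          (fun p => p.1 != some "EN EL CALENTAMIENTO:")
       (tail.take ((pwStops 0 tail).head?.getD tail.length)).map pwEntry) := by
  simp only [zip_texts, take_stop_zero]
  exact loopA_true_eq_pipeline l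

-- index? on the mapped texts finds exactly the first marker row
lemma loopA_false_eq_alt (l : List (List (Option String))) :
    pwLoopA false l = parse_warmups_alt l := by
  induction l with
  | nil => rfl
  | cons row rest ih =>
    by_cases hm : pwTextB row = some "EN EL CALENTAMIENTO:"
    · have hidx : PySem.List.index? ((row :: rest).map pwTextB) (some "EN EL CALENTAMIENTO:") =
          some 0 := by
        rw [PySem.List.index?_eq_idxOf?]
        simp [List.idxOf?_cons, hm]
      simp only [parse_warmups_alt, hidx]
      simp only [pwLoopA, pwText_eq, hm, if_true, List.map_cons, List.drop_succ_cons,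
        List.drop_zero]
      exact loopA_true_eq_alt_tail rest
    · have hA : ¬ pwTextA row = some "EN EL CALENTAMIENTO:" := hm
      simp only [pwLoopA, if_neg hA, Bool.false_eq_true, if_false]
      rw [ih]
      simp only [parse_warmups_alt, List.map_cons]
      rw [PySem.List.index?_eq_idxOf?, PySem.List.index?_eq_idxOf?]
      rw [List.idxOf?_cons]
      have hne : (pwTextB row == some "EN EL CALENTAMIENTO:") = false := by simpa using hm
      simp only [hne, Bool.false_eq_true, if_false]
      cases h : (rest.map pwTextB).idxOf? (some "EN EL CALENTAMIENTO:") with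
      | none => simp
      | some i => simp [List.drop_succ_cons]

-- ===== VERDICT =====
theorem parse_warmups_spec : Claim_equal_parse_warmups := by
  intro rows _
  unfold Spec_parse_warmups parse_warmups
  exact loopA_false_eq_alt rows
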